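-- pv_equiv track=rewrite | github.com/MaaGF1/ZIRC | src/demo/farm/resource/pick_and_train.py | get_quick_training_contract_need
-- ===== SOURCE A (Python) =====
-- def int_safe(value, default=0):
--     try:
--         return int(value)
--     except Exception:
--         return default
--
-- def get_quick_training_contract_need(current_level, target_level):
--     """
--     快速训练契约消耗规则：
--     - Lv.1 -> Lv.4 只消耗训练资料，不消耗时间，因此不需要快速训练契约；
--     - 从 Lv.4 往上，每升一级需要 1 张快速训练契约。
--     例如：
--         Lv.1 -> Lv.10 需要 6 张，分别对应 4->5,5->6,6->7,7->8,8->9,9->10。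
--         Lv.4 -> Lv.10 需要 6 张。
--         Lv.8 -> Lv.10 需要 2 张。
--     """
--     current_level = int_safe(current_level, 1)
--     target_level = int_safe(target_level, 10)
--     target_level = max(2, min(10, target_level))
--
--     if current_level >= target_level:
--         return 0
--
--     need = 0
--     for lv in range(current_level, target_level):
--         if lv >= 4:
--             need += 1
--     return need
-- ===== SOURCE B (Python) =====
-- def int_safe(value, default=0):
--     try:
--         return int(value)
--     except Exception:
--         return default
--
-- def get_quick_training_contract_need(current_level, target_level):
--     current_level = int_safe(current_level, 1)
--     target_level = int_safe(target_level, 10)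
--     target_level = max(2, min(10, target_level))
--     return max(0, target_level - max(current_level, 4))
-- ===== Notes on version B (the rewrite author's own statement) =====
-- stated objective: simpler
-- what changed: Replaced the per-level counting loop and its >=target early return with a single closed-form expression max(0, target - max(current, 4)).
import Mathlib
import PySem

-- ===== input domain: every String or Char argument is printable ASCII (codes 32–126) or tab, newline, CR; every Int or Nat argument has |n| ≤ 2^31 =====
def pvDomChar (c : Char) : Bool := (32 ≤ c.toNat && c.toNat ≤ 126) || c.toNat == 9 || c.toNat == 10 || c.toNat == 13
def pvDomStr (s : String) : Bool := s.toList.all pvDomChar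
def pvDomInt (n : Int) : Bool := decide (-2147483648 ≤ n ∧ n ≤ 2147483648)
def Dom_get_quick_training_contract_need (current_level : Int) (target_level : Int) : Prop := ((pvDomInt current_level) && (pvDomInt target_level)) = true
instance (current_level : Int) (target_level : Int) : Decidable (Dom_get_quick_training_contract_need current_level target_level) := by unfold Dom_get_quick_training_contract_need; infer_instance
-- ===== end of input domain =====

-- B replaces A's per-level counting loop by the closed form max(0, target - max(current, 4)); objective: simpler.
-- (int_safe is the identity on int inputs, so both ports start from the clamp line.)

-- ===== PORT A =====
def get_quick_training_contract_need (current_level : Int) (target_level : Int) : Int :=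
  -- int_safe(current_level, 1) = current_level and int_safe(target_level, 10) = target_level on int inputs
  let target_level := max 2 (min 10 target_level)
  if current_level ≥ target_level then 0
  else
    (PySem.List.pyRange current_level target_level 1).foldl
      (fun need lv => if lv ≥ 4 then need + 1 else need) 0

-- ===== PORT B =====
def get_quick_training_contract_need_alt (current_level : Int) (target_level : Int) : Int :=
  let target_level := max 2 (min 10 target_level)
  max 0 (target_level - max current_level 4)

-- ===== PRECONDITION & SPEC =====
def Spec_get_quick_training_contract_need (current_level : Int) (target_level : Int) (out : Int) : Prop := out = get_quick_training_contract_need_alt current_level target_level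
instance (current_level : Int) (target_level : Int) (out : Int) : Decidable (Spec_get_quick_training_contract_need current_level target_level out) := by unfold Spec_get_quick_training_contract_need; infer_instance

-- ===== CLAIM (what is proved, stated in full; the proofs are below) =====
def Claim_equal_get_quick_training_contract_need : Prop := ∀ (current_level : Int) (target_level : Int), Dom_get_quick_training_contract_need current_level target_level → Spec_get_quick_training_contract_need current_level target_level (get_quick_training_contract_need current_level target_level)

-- ===== LEMMAS AND PROOFS =====

-- The counting loop over range(a, a+n), started at any accumulator k, computes the closed form.
theorem pv_count_range (n : Nat) : ∀ (a k : Int),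
    (PySem.List.pyRange a (a + n) 1).foldl
      (fun need lv => if lv ≥ 4 then need + 1 else need) k
      = k + max 0 ((a + n) - max a 4) := by
  induction n with
  | zero =>
    intro a k
    rw [PySem.List.pyRange_one_eq_nil (by omega)]
    simp only [List.foldl_nil]
    omega
  | succ m ih =>
    intro a k
    rw [PySem.List.pyRange_one_cons (by push_cast; omega)]
    simp only [List.foldl_cons]
    have h1 : a + ((m + 1 : Nat) : Int) = (a + 1) + (m : Nat) := by push_cast; ring
    rw [h1, ih (a + 1)]
    split_ifs <;> omega

-- ===== VERDICT (by name: the statement is the Claim_ definition above) =====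
theorem get_quick_training_contract_need_spec : Claim_equal_get_quick_training_contract_need := by
  intro c t _
  unfold Spec_get_quick_training_contract_need get_quick_training_contract_need get_quick_training_contract_need_alt
  set T := max 2 (min 10 t) with hT
  by_cases h : c ≥ T
  · simp only [if_pos h]; omega
  · simp only [if_neg h]
    have hn : T = c + ((T - c).toNat : Int) := by omega
    rw [hn, pv_count_range]
    omega
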